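-- pv_equiv track=rewrite | github.com/heurtay/UP | Новая папка (9)/УП1/УП2.py | is_function
-- ===== SOURCE A (Python) =====
-- def is_function(pairs):
--     fignya = []
--     for i in pairs:
--         fignya.append(i[0])
--     if len(fignya) == len(set(fignya)):
--         return True
--     else:
--         return False
-- ===== SOURCE B (Python) =====
-- def is_function(pairs):
--     seen = set()
--     for i in pairs:
--         if i[0] in seen:
--             return False
--         seen.add(i[0])
--     return True
-- ===== Notes on version B (the rewrite author's own statement) =====
-- stated objective: simpler
-- what changed: Replaces build-a-list-of-first-elements-then-compare-len-vs-len(set) with a single early-exit pass that maintains a seen set and returns False at the first repeated key.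
import Mathlib
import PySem

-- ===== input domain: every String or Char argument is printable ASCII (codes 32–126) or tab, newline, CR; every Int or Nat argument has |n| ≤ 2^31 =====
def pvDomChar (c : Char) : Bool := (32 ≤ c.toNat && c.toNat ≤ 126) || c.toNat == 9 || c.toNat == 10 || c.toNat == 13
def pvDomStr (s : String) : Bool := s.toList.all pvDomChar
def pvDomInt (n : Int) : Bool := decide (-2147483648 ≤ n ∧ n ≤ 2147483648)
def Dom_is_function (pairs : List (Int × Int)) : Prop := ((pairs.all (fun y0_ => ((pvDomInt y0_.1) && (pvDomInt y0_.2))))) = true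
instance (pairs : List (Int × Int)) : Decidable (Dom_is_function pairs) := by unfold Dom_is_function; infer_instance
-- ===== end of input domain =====

-- B changes the strategy: one early-exit pass over a seen-set instead of building the
-- full list of first components and comparing len(list) with len(set(list)).

-- ===== PORT A =====
-- fignya = []; for i in pairs: fignya.append(i[0]); return len(fignya) == len(set(fignya))
def is_function (pairs : List (Int × Int)) : Bool :=
  let fignya := pairs.foldl (fun acc i => acc ++ [i.1]) []
  if fignya.length = (PySem.Set.ofList fignya).length then true else false

-- ===== PORT B =====
-- seen = set(); for i in pairs: if i[0] in seen: return False; seen.add(i[0]); return True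
def is_function_alt_loop (seen : PySem.Set Int) : List (Int × Int) → Bool
  | [] => true
  | i :: rest =>
    if PySem.Set.contains seen i.1 then false
    else is_function_alt_loop (PySem.Set.add seen i.1) rest

def is_function_alt (pairs : List (Int × Int)) : Bool :=
  is_function_alt_loop PySem.Set.empty pairs

-- ===== PRECONDITION & SPEC =====
def Spec_is_function (pairs : List (Int × Int)) (out : Bool) : Prop := out = is_function_alt pairs
instance (pairs : List (Int × Int)) (out : Bool) : Decidable (Spec_is_function pairs out) := by unfold Spec_is_function; infer_instance

-- ===== CLAIM (what is proved, stated in full; the proofs are below) =====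
def Claim_equal_is_function : Prop := ∀ (pairs : List (Int × Int)), Dom_is_function pairs → Spec_is_function pairs (is_function pairs)

-- ===== LEMMAS AND PROOFS =====

-- A's accumulating loop builds exactly the list of first components.
theorem pv_firsts (l : List (Int × Int)) (acc : List Int) :
    l.foldl (fun a i => a ++ [i.1]) acc = acc ++ l.map Prod.fst := by
  induction l generalizing acc with
  | nil => simp
  | cons x xs ih => simp [List.foldl, ih]

-- Folding Set.add grows the length to seen+|xs| exactly when xs is duplicate-free and disjoint from seen.
theorem pv_fold_add_len (xs : List Int) (seen : PySem.Set Int) :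
    (xs.foldl PySem.Set.add seen).length = seen.length + xs.length ↔
      xs.Nodup ∧ ∀ x ∈ xs, x ∉ seen := by
  induction xs generalizing seen with
  | nil => simp
  | cons x xs ih =>
    simp only [List.foldl]
    by_cases hx : x ∈ seen
    · have hadd : PySem.Set.add seen x = seen := by
        simp [PySem.Set.add, hx]
      rw [hadd]
      constructor
      · intro h
        -- length of foldl add ≤ seen.length + xs.length, contradiction with = seen.length + xs.length + 1
        exfalso
        have hle : ∀ (ys : List Int) (s : PySem.Set Int),
            (ys.foldl PySem.Set.add s).length ≤ s.length + ys.length := by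
          intro ys
          induction ys with
          | nil => simp
          | cons y ys ihy =>
            intro s
            simp only [List.foldl]
            calc ((ys.foldl PySem.Set.add (PySem.Set.add s y)).length)
                ≤ (PySem.Set.add s y).length + ys.length := ihy _
              _ ≤ (s.length + 1) + ys.length := by
                  simp only [PySem.Set.add]
                  split_ifs <;> simp
              _ = s.length + (ys.length + 1) := by omega
        have := hle xs seen
        simp only [List.length_cons] at h
        omega
      · rintro ⟨-, hall⟩
        exact absurd hx (hall x (by simp))
    · have hadd : PySem.Set.add seen x = seen ++ [x] := by
        simp [PySem.Set.add, hx]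
      rw [hadd]
      have hlen : seen.length + (x :: xs).length = (seen ++ [x]).length + xs.length := by
        simp; omega
      rw [hlen, ih]
      simp only [List.nodup_cons, List.mem_append, List.mem_cons, List.not_mem_nil,
        or_false, not_or]
      constructor
      · rintro ⟨hnd, hall⟩
        refine ⟨⟨fun hmem => (hall x hmem).2 rfl, hnd⟩, ?_⟩
        intro y hy
        rcases hy with rfl | hy
        · exact hx
        · exact (hall y hy).1
      · rintro ⟨⟨hxnot, hnd⟩, hall⟩
        refine ⟨hnd, fun y hy => ⟨hall y (Or.inr hy), fun hxy => hxnot (hxy ▸ hy)⟩⟩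

-- B's loop returns true iff the first components are duplicate-free and avoid seen.
theorem pv_alt_loop_iff (l : List (Int × Int)) (seen : PySem.Set Int) :
    is_function_alt_loop seen l = true ↔
      (l.map Prod.fst).Nodup ∧ ∀ x ∈ l.map Prod.fst, x ∉ seen := by
  induction l generalizing seen with
  | nil => simp [is_function_alt_loop]
  | cons i rest ih =>
    rw [show is_function_alt_loop seen (i :: rest) =
        (if PySem.Set.contains seen i.1 then false
         else is_function_alt_loop (PySem.Set.add seen i.1) rest) from rfl]
    by_cases hc : PySem.Set.contains seen i.1
    · have hmem : i.1 ∈ seen := by simpa [PySem.Set.contains] using hc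
      rw [if_pos hc]
      refine iff_of_false (by simp) ?_
      rintro ⟨-, hall⟩
      exact hall i.1 (by simp) hmem
    · have hmem : i.1 ∉ seen := by simpa [PySem.Set.contains] using hc
      have hadd : PySem.Set.add seen i.1 = seen ++ [i.1] := by simp [PySem.Set.add, hmem]
      rw [if_neg hc, hadd, ih]
      simp only [List.map_cons, List.nodup_cons, List.mem_cons, List.mem_append,
        List.not_mem_nil, or_false]
      constructor
      · rintro ⟨hnd, hall⟩
        refine ⟨⟨fun hmem' => (hall i.1 hmem') (Or.inr rfl), hnd⟩, ?_⟩
        rintro x (rfl | hx)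
        · exact hmem
        · exact fun hxs => (hall x hx) (Or.inl hxs)
      · rintro ⟨⟨hnot, hnd⟩, hall⟩
        refine ⟨hnd, fun x hx => ?_⟩
        rintro (hxs | rfl)
        · exact hall x (Or.inr hx) hxs
        · exact hnot hx

-- ===== VERDICT (by name: the statement is the Claim_ definition above) =====
theorem is_function_spec : Claim_equal_is_function := by
  intro pairs _
  unfold Spec_is_function is_function is_function_alt
  rw [pv_firsts]
  simp only [List.nil_append, PySem.Set.empty]
  have hA : ((PySem.Set.ofList (pairs.map Prod.fst)).length = (pairs.map Prod.fst).length) ↔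
      (pairs.map Prod.fst).Nodup := by
    rw [PySem.Set.ofList_eq_foldl]
    have := pv_fold_add_len (pairs.map Prod.fst) PySem.Set.empty
    simp only [PySem.Set.empty] at this
    simpa using this
  have hB := pv_alt_loop_iff pairs PySem.Set.empty
  simp only [PySem.Set.empty] at hB
  by_cases hnd : (pairs.map Prod.fst).Nodup
  · have h1 : (pairs.map Prod.fst).length = (PySem.Set.ofList (pairs.map Prod.fst)).length :=
      (hA.mpr hnd).symm
    have h2 : is_function_alt_loop [] pairs = true := hB.mpr ⟨hnd, by simp⟩
    rw [if_pos h1, h2]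
  · have h1 : ¬ (pairs.map Prod.fst).length = (PySem.Set.ofList (pairs.map Prod.fst)).length :=
      fun h => hnd (hA.mp h.symm)
    have h2 : is_function_alt_loop [] pairs = false :=
      (Bool.not_eq_true _).mp (fun h => hnd (hB.mp h).1)
    rw [if_neg h1, h2]
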